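-- pv_equiv track=rewrite | github.com/ChengjieLuo/chengjieluo.github.io | generate_publications.py | is_first_or_cofirst_author
-- ===== SOURCE A (Python) =====
-- coauthor_list = [
--     {'name': 'ciarella2021multi',
--      'authors': ['Ciarella, Simone', 'Luo, Chengjie', 'Debets, Vincent E'],
--      'cofirst': True},
--     {'name': 'ruscher2021glassy',
--      'authors': ['Ciarella, Simone', 'Luo, Chengjie'],
--      'cofirst': False},  # co-second authors, not co-first
--     {'name': 'menou2023physical',
--      'authors': ['Menou, Lucas', 'Luo, Chengjie'],
--      'cofirst': True},
--     {'name': 'luo2025theory',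
--      'authors': ['Luo, Chengjie', 'Hess, Nathaniel'],
--      'cofirst': True},
-- ]
--
-- def get_equal_authors(entry_id):
--     """Return a list of equal-contribution authors for a given entry ID."""
--     for item in coauthor_list:
--         if item['name'] == entry_id:
--             return item['authors']
--     return []
--
-- def is_cofirst(entry_id):
--     """Check if the equal-contribution authors are co-first authors."""
--     for item in coauthor_list:
--         if item['name'] == entry_id:
--             return item.get('cofirst', False)
--     return False
--
-- def is_first_or_cofirst_author(entry):
--     """Check if Chengjie Luo is first author or co-first author."""
--     authors = entry['author'].split(' and ')
--     first_author = authors[0].strip()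
--     entry_id = entry.get('ID', '')
--
--     # Check if Chengjie Luo is the first author
--     if 'Luo' in first_author and 'Chengjie' in first_author:
--         return True
--     # Check if Chengjie Luo is a co-first (equal contribution) author
--     # Only count if cofirst is True
--     equal_authors = get_equal_authors(entry_id)
--     if equal_authors and is_cofirst(entry_id):
--         if any('Luo, Chengjie' in eq for eq in equal_authors):
--             return True
--     return False
-- ===== SOURCE B (Python) =====
-- coauthor_list = [
--     {'name': 'ciarella2021multi',
--      'authors': ['Ciarella, Simone', 'Luo, Chengjie', 'Debets, Vincent E'],
--      'cofirst': True},
--     {'name': 'ruscher2021glassy',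
--      'authors': ['Ciarella, Simone', 'Luo, Chengjie'],
--      'cofirst': False},  # co-second authors, not co-first
--     {'name': 'menou2023physical',
--      'authors': ['Menou, Lucas', 'Luo, Chengjie'],
--      'cofirst': True},
--     {'name': 'luo2025theory',
--      'authors': ['Luo, Chengjie', 'Hess, Nathaniel'],
--      'cofirst': True},
-- ]
--
-- # The whole co-first decision is evaluated ONCE PER RECORD at import time:
-- # the set of entry IDs whose record is cofirst, nonempty, and lists Chengjie Luo.
-- _COFIRST_IDS = frozenset(
--     item['name']
--     for item in coauthor_list
--     if item['authors']
--     and item.get('cofirst', False)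
--     and any('Luo, Chengjie' in a for a in item['authors'])
-- )
--
-- def is_first_or_cofirst_author(entry):
--     """Check if Chengjie Luo is first author or co-first author."""
--     first_author = entry['author'].split(' and ')[0].strip()
--     if 'Luo' in first_author and 'Chengjie' in first_author:
--         return True
--     return entry.get('ID', '') in _COFIRST_IDS
-- ===== Notes on version B (the rewrite author's own statement) =====
-- stated objective: simpler
-- what changed: B hoists the entire co-first decision out of the function: at module level it precomputes the set of entry IDs whose record is cofirst, nonempty and mentions 'Luo, Chengjie', so the per-call logic is just the first-author test plus one set membership, with no per-call scan of records or of author lists and no get_equal_authors/is_cofirst helpers.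
import Mathlib
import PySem

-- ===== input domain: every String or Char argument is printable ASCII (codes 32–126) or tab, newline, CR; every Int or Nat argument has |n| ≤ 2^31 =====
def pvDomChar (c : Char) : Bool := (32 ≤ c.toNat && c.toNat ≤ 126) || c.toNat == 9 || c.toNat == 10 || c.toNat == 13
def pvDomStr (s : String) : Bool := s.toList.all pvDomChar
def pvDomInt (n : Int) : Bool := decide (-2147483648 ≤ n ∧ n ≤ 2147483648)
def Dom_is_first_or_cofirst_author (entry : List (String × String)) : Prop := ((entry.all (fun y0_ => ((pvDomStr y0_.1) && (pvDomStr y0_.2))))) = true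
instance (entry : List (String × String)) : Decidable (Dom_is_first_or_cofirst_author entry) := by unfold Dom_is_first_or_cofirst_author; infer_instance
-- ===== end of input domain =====

-- B precomputes once the set of entry IDs whose record passes the co-first test, so each call is the first-author test plus one membership; objective: simpler.


-- ===== PORT A =====
-- coauthor_list: (name, authors, cofirst)
def coauthorList : List (String × List String × Bool) :=
  [("ciarella2021multi", (["Ciarella, Simone", "Luo, Chengjie", "Debets, Vincent E"], true)),
   ("ruscher2021glassy", (["Ciarella, Simone", "Luo, Chengjie"], false)),
   ("menou2023physical", (["Menou, Lucas", "Luo, Chengjie"], true)),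
   ("luo2025theory", (["Luo, Chengjie", "Hess, Nathaniel"], true))]

def get_equal_authors (entry_id : String) : List String :=
  match coauthorList.find? (fun it => it.1 == entry_id) with
  | some it => it.2.1
  | none => []

def is_cofirst (entry_id : String) : Bool :=
  match coauthorList.find? (fun it => it.1 == entry_id) with
  | some it => it.2.2
  | none => false

def is_first_or_cofirst_author (entry : List (String × String)) : Bool :=
  let d := PySem.Dict.ofList entry
  match d.get? "author" with
  | none => false  -- KeyError: excluded by Pre_
  | some author =>
    let authors := (PySem.Str.split? author " and ").getD []
    let first_author := PySem.Str.strip (authors.headD "")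
    let entry_id := d.getD "ID" ""
    if PySem.Str.isIn "Luo" first_author && PySem.Str.isIn "Chengjie" first_author then true
    else
      let equal_authors := get_equal_authors entry_id
      if !equal_authors.isEmpty && is_cofirst entry_id then
        if equal_authors.any (fun eq => PySem.Str.isIn "Luo, Chengjie" eq) then true else false
      else false

-- ===== PORT B =====
-- Precomputed once: the set of entry IDs whose record is cofirst, nonempty and mentions 'Luo, Chengjie'.
def cofirstIds : PySem.Set String :=
  PySem.Set.ofList
    ((coauthorList.filter (fun item =>
        !item.2.1.isEmpty && item.2.2
          && item.2.1.any (fun a => PySem.Str.isIn "Luo, Chengjie" a))).map (fun item => item.1))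

def is_first_or_cofirst_author_alt (entry : List (String × String)) : Bool :=
  let d := PySem.Dict.ofList entry
  match d.get? "author" with
  | none => false  -- KeyError: excluded by Pre_
  | some author =>
    let first_author := PySem.Str.strip (((PySem.Str.split? author " and ").getD []).headD "")
    if PySem.Str.isIn "Luo" first_author && PySem.Str.isIn "Chengjie" first_author then true
    else PySem.Set.contains cofirstIds (d.getD "ID" "")

-- ===== PRECONDITION & SPEC =====
-- Pre_ excludes only entries without an "author" key, on which A raises KeyError.
def Pre_is_first_or_cofirst_author (entry : List (String × String)) : Prop :=
  entry.any (fun p => p.1 == "author") = true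
instance (entry : List (String × String)) : Decidable (Pre_is_first_or_cofirst_author entry) := by
  unfold Pre_is_first_or_cofirst_author; infer_instance

def pvWitness_is_first_or_cofirst_author : (List (String × String)) :=
  [("author", "Luo, Chengjie and Hess, Nathaniel"), ("ID", "luo2025theory")]

def Spec_is_first_or_cofirst_author (entry : List (String × String)) (out : Bool) : Prop := out = is_first_or_cofirst_author_alt entry
instance (entry : List (String × String)) (out : Bool) : Decidable (Spec_is_first_or_cofirst_author entry out) := by unfold Spec_is_first_or_cofirst_author; infer_instance

-- ===== CLAIM (what is proved, stated in full; the proofs are below) =====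
def Claim_equal_is_first_or_cofirst_author : Prop := ∀ (entry : List (String × String)), Dom_is_first_or_cofirst_author entry → Pre_is_first_or_cofirst_author entry → Spec_is_first_or_cofirst_author entry (is_first_or_cofirst_author entry)

-- ===== LEMMAS AND PROOFS =====

-- B's precomputed set is the literal three-element set.
theorem cofirstIds_eq :
    cofirstIds = ["ciarella2021multi", "menou2023physical", "luo2025theory"] := by decide

-- For every id, membership in B's precomputed set equals A's three-part per-call test.
set_option maxRecDepth 8000 in
theorem contains_eq (id : String) :
    PySem.Set.contains cofirstIds id
      = (!(get_equal_authors id).isEmpty && is_cofirst id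
          && (get_equal_authors id).any (fun eq => PySem.Str.isIn "Luo, Chengjie" eq)) := by
  by_cases h1 : id = "ciarella2021multi"
  · subst h1; decide
  by_cases h2 : id = "ruscher2021glassy"
  · subst h2; decide
  by_cases h3 : id = "menou2023physical"
  · subst h3; decide
  by_cases h4 : id = "luo2025theory"
  · subst h4; decide
  have hc : PySem.Set.contains cofirstIds id = false := by
    rw [cofirstIds_eq, ← Bool.not_eq_true, PySem.Set.contains_iff]
    simp [h1, h3, h4]
  have e1 : (("ciarella2021multi" : String) == id) = false := by simp [Ne.symm h1]
  have e2 : (("ruscher2021glassy" : String) == id) = false := by simp [Ne.symm h2]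
  have e3 : (("menou2023physical" : String) == id) = false := by simp [Ne.symm h3]
  have e4 : (("luo2025theory" : String) == id) = false := by simp [Ne.symm h4]
  rw [hc]
  simp [get_equal_authors, is_cofirst, coauthorList, List.find?, e1, e2, e3, e4]

-- ===== VERDICT (by name: the statement is the Claim_ definition above) =====
theorem is_first_or_cofirst_author_spec : Claim_equal_is_first_or_cofirst_author := by
  intro entry _ _
  unfold Spec_is_first_or_cofirst_author is_first_or_cofirst_author is_first_or_cofirst_author_alt
  set d := PySem.Dict.ofList entry with hd
  cases hget : d.get? "author" with
  | none => simp only [hget]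
  | some author =>
    simp only [hget, contains_eq]
    cases hf : (PySem.Str.isIn "Luo" (PySem.Str.strip ((((PySem.Str.split? author " and ").getD []).headD ""))) && PySem.Str.isIn "Chengjie" (PySem.Str.strip ((((PySem.Str.split? author " and ").getD []).headD "")))) <;>
      simp only [if_true, if_false, Bool.false_eq_true]
    cases hc : (!(get_equal_authors (d.getD "ID" "")).isEmpty && is_cofirst (d.getD "ID" "")) <;>
      cases ha : ((get_equal_authors (d.getD "ID" "")).any (fun eq => PySem.Str.isIn "Luo, Chengjie" eq)) <;>
        simp [hc, ha]
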